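-- pv_equiv track=rewrite | github.com/wky-911/LLMs-assisted4planning | predecessor_merge.py | cycle_anchors_for_merged
-- ===== SOURCE A (Python) =====
-- from typing import Dict, List, Tuple, Set, Iterable
--
-- def _first_cycle_preferring_head(chain: List[str]):
--     if not chain:
--         return None
--     # 1) 头结点是否复现
--     head = chain[0]
--     for j in range(1, len(chain)):
--         if chain[j] == head:
--             return (head, 0, 1)  # b=head, i0=0, X=chain[1]
--
--     # 2) 否则：从头扫描第一个重复节点
--     first_index: Dict[str, int] = {}
--     for i, node in enumerate(chain):
--         if node in first_index:
--             i0 = first_index[node]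
--             if i0 + 1 < len(chain):
--                 return (node, i0, i0 + 1)
--             else:
--                 return None
--         else:
--             first_index[node] = i
--     return None
--
-- def cycle_anchors_for_merged(merged_with_anchors: List[Tuple[str, List[str]]]
--                              ) -> List[Tuple[str, str]]:
--     """
--     对每条链返回 (cycle_node, chain_str)。若无环，则忽略该链（也可按需保留）。
--     注意：这里只负责“把锚点改成成环对象”，真正是否成环的判断由 _first_cycle_preferring_head 完成。
--     """
--     out: List[Tuple[str, str]] = []
--     for _, chain in merged_with_anchors:
--         det = _first_cycle_preferring_head(chain)
--         if det is not None:
--             b, i0, succ_idx = det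
--             out.append((b, pretty_chain(chain)))
--     return out
--
-- def pretty_chain(chain: Iterable[str]) -> str:
--     return "->".join(chain)
-- ===== SOURCE B (Python) =====
-- def _cycle_node(chain):
--     # One pass: track seen nodes, the first repeated node, and whether the head recurs.
--     seen = set()
--     dup = None
--     head_recur = False
--     for node in chain:
--         if node in seen:
--             if dup is None:
--                 dup = node
--             if node == chain[0]:
--                 head_recur = True
--         else:
--             seen.add(node)
--     return chain[0] if head_recur else dup
--
--
-- def cycle_anchors_for_merged(merged_with_anchors):
--     return [(node, "->".join(chain))
--             for _, chain in merged_with_anchors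
--             if (node := _cycle_node(chain)) is not None]
-- ===== Notes on version B (the rewrite author's own statement) =====
-- stated objective: simpler
-- what changed: B detects the cycle node in one pass per chain with a seen-set, the first repeated node and a head-recurred flag, instead of A's two scans (a head-recurrence loop over the tail, then a second enumerate scan building a dict of first indices with index bookkeeping and a dead i0+1<len guard); the outer loop becomes a comprehension.
import Mathlib
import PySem

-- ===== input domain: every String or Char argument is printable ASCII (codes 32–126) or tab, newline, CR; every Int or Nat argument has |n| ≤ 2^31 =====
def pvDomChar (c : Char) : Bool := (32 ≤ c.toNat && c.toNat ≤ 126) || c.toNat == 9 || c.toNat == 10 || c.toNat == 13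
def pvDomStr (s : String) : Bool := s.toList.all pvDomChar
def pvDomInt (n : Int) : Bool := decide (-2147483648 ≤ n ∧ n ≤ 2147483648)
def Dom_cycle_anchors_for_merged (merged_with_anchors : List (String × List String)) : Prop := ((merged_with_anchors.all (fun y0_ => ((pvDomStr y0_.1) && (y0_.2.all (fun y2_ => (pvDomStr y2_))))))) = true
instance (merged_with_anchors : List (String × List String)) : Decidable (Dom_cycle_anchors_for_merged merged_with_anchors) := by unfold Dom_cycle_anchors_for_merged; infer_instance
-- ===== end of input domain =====

-- B replaces A's two scans per chain (head-recurrence loop, then a dict-of-first-indices scan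
-- with index bookkeeping) by one pass over the chain keeping a seen-set, the first repeated
-- node and a head-recurred flag; objective: simpler.

-- ===== PORT A =====
-- 'for j in range(1, len(chain)): if chain[j] == head: return ...' — loop over the tail, early return as Bool
def pvAHeadLoop (head : String) : List String → Bool
  | [] => false
  | x :: xs => if x == head then true else pvAHeadLoop head xs

-- 'for i, node in enumerate(chain): ...' with dict first_index, early returns
def pvAScan (n : Int) : List String → Int → PySem.Dict String Int → Option (String × Int × Int)
  | [], _, _ => none
  | node :: rest, i, d =>
    match d.get? node with
    | some i0 => if i0 + 1 < n then some (node, i0, i0 + 1) else none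
    | none => pvAScan n rest (i + 1) (d.insert node i)

def first_cycle_preferring_head (chain : List String) : Option (String × Int × Int) :=
  match chain with
  | [] => none
  | head :: tail =>
    if pvAHeadLoop head tail then some (head, 0, 1)
    else pvAScan (chain.length : Int) chain 0 PySem.Dict.empty

def pretty_chain (chain : List String) : String := PySem.Str.join "->" chain

def cycle_anchors_for_merged (merged_with_anchors : List (String × List String)) : List (String × String) :=
  merged_with_anchors.foldl (fun out p =>
    match first_cycle_preferring_head p.2 with
    | some (b, _, _) => out ++ [(b, pretty_chain p.2)]
    | none => out) []

-- ===== PORT B =====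
-- single pass: seen set, first duplicate, head-recurred flag (Source B's loop)
def pvBLoop (head : String) : List String → PySem.Set String → Option String → Bool → (Option String × Bool)
  | [], _, dup, hr => (dup, hr)
  | node :: rest, seen, dup, hr =>
    if PySem.Set.contains seen node then
      pvBLoop head rest seen (if dup.isNone then some node else dup) (if node == head then true else hr)
    else
      pvBLoop head rest (PySem.Set.add seen node) dup hr

-- 'return chain[0] if head_recur else dup'; chain[0] is only read when head_recur, which forces chain ≠ []
def pvCycleNode (chain : List String) : Option String :=
  match chain with
  | [] => none
  | head :: _ =>
    let r := pvBLoop head chain PySem.Set.empty none false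
    if r.2 then some head else r.1

def cycle_anchors_for_merged_alt (merged_with_anchors : List (String × List String)) : List (String × String) :=
  merged_with_anchors.filterMap (fun p =>
    (pvCycleNode p.2).map (fun node => (node, PySem.Str.join "->" p.2)))

-- ===== PRECONDITION & SPEC =====
def Spec_cycle_anchors_for_merged (merged_with_anchors : List (String × List String)) (out : List (String × String)) : Prop := out = cycle_anchors_for_merged_alt merged_with_anchors
instance (merged_with_anchors : List (String × List String)) (out : List (String × String)) : Decidable (Spec_cycle_anchors_for_merged merged_with_anchors out) := by unfold Spec_cycle_anchors_for_merged; infer_instance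

-- ===== CLAIM (what is proved, stated in full; the proofs are below) =====
def Claim_equal_cycle_anchors_for_merged : Prop := ∀ (merged_with_anchors : List (String × List String)), Dom_cycle_anchors_for_merged merged_with_anchors → Spec_cycle_anchors_for_merged merged_with_anchors (cycle_anchors_for_merged merged_with_anchors)

-- ===== LEMMAS AND PROOFS =====

lemma pvAHeadLoop_iff (head : String) (l : List String) :
    pvAHeadLoop head l = true ↔ head ∈ l := by
  induction l with
  | nil => simp [pvAHeadLoop]
  | cons x xs ih =>
    simp only [pvAHeadLoop, List.mem_cons]
    by_cases h : x = head
    · simp [h]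
    · have hb : (x == head) = false := by simp [h]
      simp only [hb, Bool.false_eq_true, if_false, ih]
      constructor
      · exact Or.inr
      · rintro (hh | hh)
        · exact absurd hh.symm h
        · exact hh

-- once hr is true it stays true
lemma pvBLoop_hr_persist (head : String) (l : List String) :
    ∀ seen dup, (pvBLoop head l seen dup true).2 = true := by
  induction l with
  | nil => intro seen dup; simp [pvBLoop]
  | cons x xs ih =>
    intro seen dup
    simp only [pvBLoop]
    split
    · have : (if (x == head) = true then true else true) = true := by split <;> rfl
      simp only [this]; exact ih _ _
    · exact ih _ _

-- once dup is some it stays some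
lemma pvBLoop_dup_persist (head : String) (l : List String) :
    ∀ seen x hr, (pvBLoop head l seen (some x) hr).1 = some x := by
  induction l with
  | nil => intro seen x hr; simp [pvBLoop]
  | cons y ys ih =>
    intro seen x hr
    simp only [pvBLoop, Option.isNone_some, Bool.false_eq_true, if_false]
    split
    · exact ih _ _ _
    · exact ih _ _ _

-- hr becomes true when head is in the remaining list and already seen
lemma pvBLoop_hr_of_mem (head : String) (l : List String) :
    ∀ seen dup, head ∈ l → head ∈ seen → (pvBLoop head l seen dup false).2 = true := by
  induction l with
  | nil => intro _ _ h; exact absurd h (List.not_mem_nil)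
  | cons x xs ih =>
    intro seen dup hmem hseen
    simp only [pvBLoop]
    by_cases hx : x = head
    · subst hx
      have hc : PySem.Set.contains seen x = true := by
        rw [PySem.Set.contains_iff]; exact hseen
      simp only [hc, if_true, beq_self_eq_true, if_true]
      exact pvBLoop_hr_persist _ _ _ _
    · have hmem' : head ∈ xs := by
        rcases List.mem_cons.mp hmem with h | h
        · exact absurd h.symm hx
        · exact h
      have hxh : (x == head) = false := by simp [hx]
      split
      · simp only [hxh, Bool.false_eq_true, if_false]
        exact ih _ _ hmem' hseen
      · exact ih _ _ hmem' (by simp [PySem.Set.mem_add, hseen])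

-- hr stays false when head is not in the remaining list
lemma pvBLoop_hr_of_not_mem (head : String) (l : List String) :
    ∀ seen dup, head ∉ l → (pvBLoop head l seen dup false).2 = false := by
  induction l with
  | nil => intro _ _ _; simp [pvBLoop]
  | cons x xs ih =>
    intro seen dup hnm
    have hx : x ≠ head := fun h => hnm (h ▸ List.mem_cons_self)
    have hxs : head ∉ xs := fun h => hnm (List.mem_cons_of_mem _ h)
    have hxh : (x == head) = false := by simp [hx]
    simp only [pvBLoop]
    split
    · simp only [hxh, Bool.false_eq_true, if_false]
      exact ih _ _ hxs
    · exact ih _ _ hxs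

-- core invariant: A's dict scan and B's set scan find the same first duplicate
lemma scan_eq (head : String) (n : Int) (l : List String) :
    ∀ (i : Int) (d : PySem.Dict String Int) (seen : PySem.Set String) (hr : Bool),
      (∀ x, (d.get? x).isSome = PySem.Set.contains seen x) →
      (i + (l.length : Int) = n) →
      (∀ x v, d.get? x = some v → v + 1 + (l.length : Int) ≤ n) →
      (pvAScan n l i d).map (·.1) = (pvBLoop head l seen none hr).1 := by
  induction l with
  | nil => intro i d seen hr _ _ _; simp [pvAScan, pvBLoop]
  | cons node rest ih =>
    intro i d seen hr hinv hlen hval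
    simp only [pvAScan, pvBLoop]
    cases hnode : d.get? node with
    | some v =>
      have hc : PySem.Set.contains seen node = true := by
        rw [← hinv]; simp [hnode]
      have hvn : v + 1 < n := by
        have := hval node v hnode
        have hlp : (0:Int) ≤ (rest.length : Int) := Int.natCast_nonneg _
        simp only [List.length_cons] at this
        push_cast at this
        omega
      simp only [hvn, if_true, Option.map_some, hc, Option.isNone_none]
      rw [pvBLoop_dup_persist]
    | none =>
      have hc : PySem.Set.contains seen node = false := by
        rw [← hinv]; simp [hnode]
      simp only [hc, Bool.false_eq_true, if_false]
      apply ih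
      · intro x
        by_cases hx : x = node
        · subst hx
          rw [PySem.Dict.get?_insert_self]
          have hm : x ∈ PySem.Set.add seen x := (PySem.Set.mem_add _ _ _).mpr (Or.inr rfl)
          simp
        · rw [PySem.Dict.get?_insert_of_ne _ _ hx, hinv]
          have hmadd : x ∈ PySem.Set.add seen node ↔ x ∈ seen := by
            rw [PySem.Set.mem_add]; simp [hx]
          by_cases hmx : x ∈ seen
          · have h1 : PySem.Set.contains seen x = true := (PySem.Set.contains_iff _ _).mpr hmx
            have h2 : PySem.Set.contains (PySem.Set.add seen node) x = true :=
              (PySem.Set.contains_iff _ _).mpr (hmadd.mpr hmx)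
            rw [h1, h2]
          · have h1 : PySem.Set.contains seen x = false := by
              rw [← Bool.not_eq_true]; intro h; exact hmx ((PySem.Set.contains_iff _ _).mp h)
            have h2 : PySem.Set.contains (PySem.Set.add seen node) x = false := by
              rw [← Bool.not_eq_true]; intro h
              exact hmx (hmadd.mp ((PySem.Set.contains_iff _ _).mp h))
            rw [h1, h2]
      · simp only [List.length_cons] at hlen; push_cast at hlen ⊢; omega
      · intro x v hx
        by_cases hxn : x = node
        · subst hxn
          rw [PySem.Dict.get?_insert_self] at hx
          cases hx
          simp only [List.length_cons] at hlen; push_cast at hlen ⊢; omega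
        · rw [PySem.Dict.get?_insert_of_ne _ _ hxn] at hx
          have := hval x v hx
          simp only [List.length_cons] at this; push_cast at this ⊢; omega

-- per-chain equality: A's detector (first component) equals B's
lemma cycle_node_eq (chain : List String) :
    (first_cycle_preferring_head chain).map (·.1) = pvCycleNode chain := by
  cases chain with
  | nil => rfl
  | cons head tail =>
    -- both first steps reduce definitionally: A's dict is empty, B's seen-set is empty
    have hA : first_cycle_preferring_head (head :: tail)
        = (if pvAHeadLoop head tail = true then some (head, 0, 1)
           else pvAScan (((head :: tail).length : Int)) tail 1 (PySem.Dict.empty.insert head 0)) := rfl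
    have hB : pvCycleNode (head :: tail)
        = (if (pvBLoop head tail (PySem.Set.add PySem.Set.empty head) none false).2 = true
           then some head
           else (pvBLoop head tail (PySem.Set.add PySem.Set.empty head) none false).1) := rfl
    rw [hA, hB]
    have hhead_seen : head ∈ PySem.Set.add PySem.Set.empty head :=
      (PySem.Set.mem_add _ _ _).mpr (Or.inr rfl)
    by_cases hmem : head ∈ tail
    · have h1 : pvAHeadLoop head tail = true := (pvAHeadLoop_iff head tail).mpr hmem
      have h2 : (pvBLoop head tail (PySem.Set.add PySem.Set.empty head) none false).2 = true :=
        pvBLoop_hr_of_mem head tail _ none hmem hhead_seen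
      rw [h1, h2]; rfl
    · have h1 : pvAHeadLoop head tail = false := by
        rw [← Bool.not_eq_true]; intro h; exact hmem ((pvAHeadLoop_iff head tail).mp h)
      have h2 : (pvBLoop head tail (PySem.Set.add PySem.Set.empty head) none false).2 = false :=
        pvBLoop_hr_of_not_mem head tail _ none hmem
      rw [h1, h2]
      simp only [Bool.false_eq_true, if_false]
      apply scan_eq
      · intro x
        by_cases hx : x = head
        · subst hx
          rw [PySem.Dict.get?_insert_self]
          simp
        · rw [PySem.Dict.get?_insert_of_ne _ _ hx, PySem.Dict.get?_empty]
          have hc : PySem.Set.contains (PySem.Set.add PySem.Set.empty head) x = false := by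
            rw [← Bool.not_eq_true]; intro h
            have hm := (PySem.Set.contains_iff _ _).mp h
            rw [PySem.Set.mem_add] at hm
            rcases hm with hm | hm
            · exact List.not_mem_nil hm
            · exact hx hm
          simp only [hc, Option.isSome_none]
      · simp only [List.length_cons]; push_cast; omega
      · intro x v hx
        by_cases hxh : x = head
        · subst hxh
          rw [PySem.Dict.get?_insert_self] at hx
          cases hx
          simp only [List.length_cons]; push_cast; omega
        · rw [PySem.Dict.get?_insert_of_ne _ _ hxh, PySem.Dict.get?_empty] at hx
          cases hx

-- fold-with-append vs filterMap, generalized over the accumulator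
lemma outer_eq (l : List (String × List String)) :
    ∀ acc : List (String × String),
      l.foldl (fun out p =>
        match first_cycle_preferring_head p.2 with
        | some (b, _, _) => out ++ [(b, pretty_chain p.2)]
        | none => out) acc
      = acc ++ l.filterMap (fun p =>
          (pvCycleNode p.2).map (fun node => (node, PySem.Str.join "->" p.2))) := by
  induction l with
  | nil => intro acc; simp
  | cons p ps ih =>
    intro acc
    have hkey := cycle_node_eq p.2
    simp only [List.foldl_cons, List.filterMap_cons]
    cases hA : first_cycle_preferring_head p.2 with
    | none =>
      have hB : pvCycleNode p.2 = none := by rw [← hkey, hA]; rfl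
      simp only [hB, Option.map_none, ih]
    | some t =>
      obtain ⟨b, i0, s⟩ := t
      have hB : pvCycleNode p.2 = some b := by rw [← hkey, hA]; rfl
      rw [ih, hB]
      simp [pretty_chain]

-- ===== VERDICT (by name: the statement is the Claim_ definition above) =====
theorem cycle_anchors_for_merged_spec : Claim_equal_cycle_anchors_for_merged := by
  intro m _
  show cycle_anchors_for_merged m = cycle_anchors_for_merged_alt m
  unfold cycle_anchors_for_merged cycle_anchors_for_merged_alt
  simpa using outer_eq m []
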